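-- pv_equiv track=rewrite | github.com/Dazckel/TFG | SiameseDataset.py | getSamePreproADNI
-- ===== SOURCE A (Python) =====
-- def getNumberOperation(fileName):
--     counter = 0
--     if 'N3' in fileName:
--         counter += 1
--     if 'B1' in fileName:
--         counter += 1
--     if 'GradWarp' in fileName:
--         counter += 1
--     return counter
--
-- def getSamePreproADNI(images):
--     op_1 = []
--     op_2 = []
--     op_3 = []
--     for image in images:
--         if getNumberOperation(image) == 1:
--             op_1.append(image)
--         elif getNumberOperation(image) == 2:
--             op_2.append(image)
--         elif getNumberOperation(image) == 3:
--             op_3.append(image)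
--
--     return [op_1, op_2, op_3]
-- ===== SOURCE B (Python) =====
-- def getSamePreproADNI(images):
--     def ops(im):
--         return ('N3' in im) + ('B1' in im) + ('GradWarp' in im)
--     return [[im for im in images if ops(im) == k] for k in (1, 2, 3)]
-- ===== Notes on version B (the rewrite author's own statement) =====
-- stated objective: simpler
-- what changed: Replaces the single pass that maintains three named accumulator lists via an if/elif chain with three staged filter passes: one list comprehension per operation count 1, 2, 3, assembled directly into the result.
import Mathlib
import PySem

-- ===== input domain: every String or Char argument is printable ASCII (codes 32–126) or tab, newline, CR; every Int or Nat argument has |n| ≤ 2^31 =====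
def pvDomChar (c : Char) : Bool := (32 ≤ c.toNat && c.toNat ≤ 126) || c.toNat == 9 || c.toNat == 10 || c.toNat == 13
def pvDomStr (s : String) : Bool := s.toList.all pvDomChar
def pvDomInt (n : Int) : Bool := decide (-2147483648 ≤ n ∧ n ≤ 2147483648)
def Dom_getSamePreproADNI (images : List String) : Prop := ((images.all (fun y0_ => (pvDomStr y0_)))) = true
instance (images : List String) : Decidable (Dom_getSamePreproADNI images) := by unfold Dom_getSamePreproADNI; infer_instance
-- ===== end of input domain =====

-- B replaces the single accumulator pass with three staged filter passes (simpler decomposition; same cost).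
-- ===== PORT A =====
def getNumberOperation (fileName : String) : Int :=
  let counter : Int := 0
  let counter := if PySem.Str.isIn "N3" fileName then counter + 1 else counter
  let counter := if PySem.Str.isIn "B1" fileName then counter + 1 else counter
  let counter := if PySem.Str.isIn "GradWarp" fileName then counter + 1 else counter
  counter

-- loop body of A's for-loop (if/elif chain appending to op_1/op_2/op_3)
def pvStepA (acc : List String × List String × List String) (image : String) :
    List String × List String × List String :=
  let (op1, op2, op3) := acc
  if getNumberOperation image == 1 then (op1 ++ [image], op2, op3)
  else if getNumberOperation image == 2 then (op1, op2 ++ [image], op3)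
  else if getNumberOperation image == 3 then (op1, op2, op3 ++ [image])
  else (op1, op2, op3)

def getSamePreproADNI (images : List String) : List (List String) :=
  let acc := images.foldl pvStepA ([], [], [])
  [acc.1, acc.2.1, acc.2.2]

-- ===== PORT B =====
-- ops(im) = ('N3' in im) + ('B1' in im) + ('GradWarp' in im)  (bools sum as ints)
def pvOps (im : String) : Int :=
  (if PySem.Str.isIn "N3" im then (1 : Int) else 0)
  + (if PySem.Str.isIn "B1" im then (1 : Int) else 0)
  + (if PySem.Str.isIn "GradWarp" im then (1 : Int) else 0)

def getSamePreproADNI_alt (images : List String) : List (List String) :=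
  [(1 : Int), 2, 3].map (fun k => images.filter (fun im => pvOps im == k))

-- ===== PRECONDITION & SPEC =====
def Spec_getSamePreproADNI (images : List String) (out : List (List String)) : Prop := out = getSamePreproADNI_alt images
instance (images : List String) (out : List (List String)) : Decidable (Spec_getSamePreproADNI images out) := by unfold Spec_getSamePreproADNI; infer_instance

-- ===== CLAIM (what is proved, stated in full; the proofs are below) =====
def Claim_equal_getSamePreproADNI : Prop := ∀ (images : List String), Dom_getSamePreproADNI images → Spec_getSamePreproADNI images (getSamePreproADNI images)

-- ===== LEMMAS AND PROOFS =====
-- both counts agree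
lemma ops_eq (im : String) : pvOps im = getNumberOperation im := by
  simp only [pvOps, getNumberOperation]
  cases PySem.Str.isIn "N3" im <;> cases PySem.Str.isIn "B1" im <;>
    cases PySem.Str.isIn "GradWarp" im <;> simp

-- A's fold builds the three filters
lemma foldA_eq (images : List String) (a1 a2 a3 : List String) :
    images.foldl pvStepA (a1, a2, a3)
    = (a1 ++ images.filter (fun im => getNumberOperation im == 1),
       a2 ++ images.filter (fun im => getNumberOperation im == 2),
       a3 ++ images.filter (fun im => getNumberOperation im == 3)) := by
  induction images generalizing a1 a2 a3 with
  | nil => simp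
  | cons x xs ih =>
    simp only [List.foldl_cons, List.filter_cons]
    by_cases h1 : getNumberOperation x = 1
    · rw [show pvStepA (a1, a2, a3) x = (a1 ++ [x], a2, a3) from by simp [pvStepA, h1], ih]
      simp [h1]
    · by_cases h2 : getNumberOperation x = 2
      · rw [show pvStepA (a1, a2, a3) x = (a1, a2 ++ [x], a3) from by simp [pvStepA, h2], ih]
        simp [h2]
      · by_cases h3 : getNumberOperation x = 3
        · rw [show pvStepA (a1, a2, a3) x = (a1, a2, a3 ++ [x]) from by
            simp [pvStepA, h3], ih]
          simp [h3]
        · rw [show pvStepA (a1, a2, a3) x = (a1, a2, a3) from by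
            simp [pvStepA, h1, h2, h3], ih]
          simp [h1, h2, h3]

-- ===== VERDICT =====
theorem getSamePreproADNI_spec : Claim_equal_getSamePreproADNI := by
  intro images _
  unfold Spec_getSamePreproADNI getSamePreproADNI getSamePreproADNI_alt
  simp [foldA_eq, funext ops_eq]
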